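-- pv_equiv track=rewrite | github.com/sujith-eag/timetable-module | src/timetable/core/semester_detector.py | get_subject_files_for_semesters
-- ===== SOURCE A (Python) =====
-- from typing import Tuple, List, Dict, Any
--
-- def get_subject_files_for_semesters(active_semesters: Tuple[int, ...]) -> List[str]:
--     """
--     Get list of subject file names needed for active semesters.
--
--     This determines which subject files should be loaded based on
--     which semesters are active. Only semester-specific files are returned.
--
--     Args:
--         active_semesters: Tuple of active semester numbers
--
--     Returns:
--         List of filenames to load from stage_1/
--
--     Example:
--         >>> get_subject_files_for_semesters((2, 4))
--         ['subjects2CoreBasic.json', 'subjects2ElectBasic.json',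
--          'subjects4CoreBasic.json', 'subjects4ElectBasic.json']
--     """
--     files = []
--
--     for sem in sorted(active_semesters):
--         if sem == 1:
--             files.extend([
--                 'subjects1CoreBasic.json',
--                 'subjects1Diff.json'
--             ])
--         elif sem == 2:
--             files.extend([
--                 'subjects2CoreBasic.json',
--                 'subjects2ElectBasic.json',
--                 'subjects2Diff.json'
--             ])
--         elif sem == 3:
--             files.extend([
--                 'subjects3CoreBasic.json',
--                 'subjects3ElectBasic.json',
--                 'subjects3Diff.json'
--             ])
--         elif sem == 4:
--             files.extend([
--                 'subjects4CoreBasic.json',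
--                 'subjects4ElectBasic.json',
--                 'subjects4Diff.json'
--             ])
--
--     return files
-- ===== SOURCE B (Python) =====
-- def get_subject_files_for_semesters(active_semesters):
--     groups = {
--         1: ['subjects1CoreBasic.json', 'subjects1Diff.json'],
--         2: ['subjects2CoreBasic.json', 'subjects2ElectBasic.json', 'subjects2Diff.json'],
--         3: ['subjects3CoreBasic.json', 'subjects3ElectBasic.json', 'subjects3Diff.json'],
--         4: ['subjects4CoreBasic.json', 'subjects4ElectBasic.json', 'subjects4Diff.json'],
--     }
--     files = []
--     for sem, group in groups.items():
--         files += group * active_semesters.count(sem)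
--     return files
-- ===== Notes on version B (the rewrite author's own statement) =====
-- stated objective: faster
-- what changed: Counting instead of sorting: B never sorts the input; it iterates the four relevant semesters in order and emits each semester's file group repeated count(sem) times, which reproduces the sorted output because equal semesters are contiguous in sorted order.
import Mathlib
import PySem

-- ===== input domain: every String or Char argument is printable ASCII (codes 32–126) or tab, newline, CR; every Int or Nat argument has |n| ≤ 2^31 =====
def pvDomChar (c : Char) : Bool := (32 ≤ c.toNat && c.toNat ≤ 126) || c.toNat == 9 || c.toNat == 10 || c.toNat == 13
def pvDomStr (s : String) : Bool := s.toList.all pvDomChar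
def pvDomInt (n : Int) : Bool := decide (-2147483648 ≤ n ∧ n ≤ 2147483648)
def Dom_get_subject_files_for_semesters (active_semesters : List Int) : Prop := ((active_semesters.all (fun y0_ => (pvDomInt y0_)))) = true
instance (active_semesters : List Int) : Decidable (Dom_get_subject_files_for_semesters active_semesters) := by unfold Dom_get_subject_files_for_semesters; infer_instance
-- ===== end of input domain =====

-- B replaces sort-then-append by counting: it emits each semester's file group count(sem) times for sem = 1..4; objective: faster (no sort).


-- ===== PORT A =====
def get_subject_files_for_semesters (active_semesters : List Int) : List String :=
  (PySem.List.sorted active_semesters (fun x => x)).foldl (fun files sem =>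
    if sem = 1 then
      files ++ ["subjects1CoreBasic.json", "subjects1Diff.json"]
    else if sem = 2 then
      files ++ ["subjects2CoreBasic.json", "subjects2ElectBasic.json", "subjects2Diff.json"]
    else if sem = 3 then
      files ++ ["subjects3CoreBasic.json", "subjects3ElectBasic.json", "subjects3Diff.json"]
    else if sem = 4 then
      files ++ ["subjects4CoreBasic.json", "subjects4ElectBasic.json", "subjects4Diff.json"]
    else files) []

-- ===== PORT B =====
-- the dict 'groups' of Source B, as an association list in insertion order
def pvGroups : List (Int × List String) :=
  [(1, ["subjects1CoreBasic.json", "subjects1Diff.json"]),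
   (2, ["subjects2CoreBasic.json", "subjects2ElectBasic.json", "subjects2Diff.json"]),
   (3, ["subjects3CoreBasic.json", "subjects3ElectBasic.json", "subjects3Diff.json"]),
   (4, ["subjects4CoreBasic.json", "subjects4ElectBasic.json", "subjects4Diff.json"])]

def get_subject_files_for_semesters_alt (active_semesters : List Int) : List String :=
  pvGroups.foldl (fun files p =>
    files ++ (List.replicate (PySem.List.count active_semesters p.1) p.2).flatten) []

-- ===== PRECONDITION & SPEC =====
def Spec_get_subject_files_for_semesters (active_semesters : List Int) (out : List String) : Prop := out = get_subject_files_for_semesters_alt active_semesters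
instance (active_semesters : List Int) (out : List String) : Decidable (Spec_get_subject_files_for_semesters active_semesters out) := by unfold Spec_get_subject_files_for_semesters; infer_instance

-- ===== CLAIM (what is proved, stated in full; the proofs are below) =====
def Claim_equal_get_subject_files_for_semesters : Prop := ∀ (active_semesters : List Int), Dom_get_subject_files_for_semesters active_semesters → Spec_get_subject_files_for_semesters active_semesters (get_subject_files_for_semesters active_semesters)

-- ===== LEMMAS AND PROOFS =====

-- A's per-element appended chunk, acc-free
def pvChunk (sem : Int) : List String :=
  if sem = 1 then ["subjects1CoreBasic.json", "subjects1Diff.json"]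
  else if sem = 2 then ["subjects2CoreBasic.json", "subjects2ElectBasic.json", "subjects2Diff.json"]
  else if sem = 3 then ["subjects3CoreBasic.json", "subjects3ElectBasic.json", "subjects3Diff.json"]
  else if sem = 4 then ["subjects4CoreBasic.json", "subjects4ElectBasic.json", "subjects4Diff.json"]
  else []

def pvRel (s : Int) : Bool := decide (s = 1 ∨ s = 2 ∨ s = 3 ∨ s = 4)

-- A's fold is flatMap of the chunk function
theorem pvA_eq_flatMap (xs : List Int) (acc : List String) :
    xs.foldl (fun files sem =>
      if sem = 1 then files ++ ["subjects1CoreBasic.json", "subjects1Diff.json"]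
      else if sem = 2 then files ++ ["subjects2CoreBasic.json", "subjects2ElectBasic.json", "subjects2Diff.json"]
      else if sem = 3 then files ++ ["subjects3CoreBasic.json", "subjects3ElectBasic.json", "subjects3Diff.json"]
      else if sem = 4 then files ++ ["subjects4CoreBasic.json", "subjects4ElectBasic.json", "subjects4Diff.json"]
      else files) acc = acc ++ xs.flatMap pvChunk := by
  induction xs generalizing acc with
  | nil => simp
  | cons sem xs ih =>
    simp only [List.foldl_cons, List.flatMap_cons]
    rw [show (if sem = 1 then acc ++ ["subjects1CoreBasic.json", "subjects1Diff.json"]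
      else if sem = 2 then acc ++ ["subjects2CoreBasic.json", "subjects2ElectBasic.json", "subjects2Diff.json"]
      else if sem = 3 then acc ++ ["subjects3CoreBasic.json", "subjects3ElectBasic.json", "subjects3Diff.json"]
      else if sem = 4 then acc ++ ["subjects4CoreBasic.json", "subjects4ElectBasic.json", "subjects4Diff.json"]
      else acc) = acc ++ pvChunk sem by unfold pvChunk; split_ifs <;> simp]
    rw [ih, List.append_assoc]

-- irrelevant semesters contribute nothing
theorem pvFlatMap_filter (ys : List Int) :
    ys.flatMap pvChunk = (ys.filter pvRel).flatMap pvChunk := by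
  induction ys with
  | nil => simp
  | cons y ys ih =>
    by_cases h : pvRel y = true
    · simp [h, ih]
    · have hz : pvChunk y = [] := by
        unfold pvRel at h; simp at h
        unfold pvChunk; simp [h.1, h.2.1, h.2.2.1, h.2.2.2]
      simp [h, hz, ih]

-- the canonical sorted arrangement of the relevant elements
def pvRep (xs : List Int) : List Int :=
  List.replicate (xs.count 1) 1 ++ List.replicate (xs.count 2) 2
  ++ List.replicate (xs.count 3) 3 ++ List.replicate (xs.count 4) 4

theorem pvRep_perm (xs : List Int) : (pvRep xs).Perm (xs.filter pvRel) := by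
  rw [List.perm_iff_count]
  intro a
  by_cases h1 : a = 1
  · subst h1; simp [pvRep, List.count_append, List.count_replicate, List.count_filter, pvRel]
  · by_cases h2 : a = 2
    · subst h2; simp [pvRep, List.count_append, List.count_replicate, List.count_filter, pvRel]
    · by_cases h3 : a = 3
      · subst h3; simp [pvRep, List.count_append, List.count_replicate, List.count_filter, pvRel]
      · by_cases h4 : a = 4
        · subst h4; simp [pvRep, List.count_append, List.count_replicate, List.count_filter, pvRel]
        · have hnm : a ∉ xs.filter pvRel := by
            intro hmem
            have := (List.mem_filter.mp hmem).2
            simp [pvRel] at this; omega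
          simp [pvRep, List.count_append, List.count_replicate, Ne.symm h1, Ne.symm h2,
            Ne.symm h3, Ne.symm h4, List.count_eq_zero.mpr hnm]

theorem pvRep_pairwise (xs : List Int) : (pvRep xs).Pairwise (· ≤ ·) := by
  have rep : ∀ (n : Nat) (v : Int), (List.replicate n v).Pairwise (fun a b : Int => a ≤ b) :=
    fun n v => List.pairwise_replicate.mpr (Or.inr (le_refl v))
  unfold pvRep
  refine List.pairwise_append.mpr ⟨?_, rep _ _, ?_⟩
  · refine List.pairwise_append.mpr ⟨?_, rep _ _, ?_⟩
    · refine List.pairwise_append.mpr ⟨rep _ _, rep _ _, ?_⟩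
      intro a ha b hb; rw [List.mem_replicate] at ha hb; omega
    · intro a ha b hb
      rw [List.mem_replicate] at hb
      rcases List.mem_append.mp ha with h | h <;> (rw [List.mem_replicate] at h; omega)
  · intro a ha b hb
    rw [List.mem_replicate] at hb
    rcases List.mem_append.mp ha with h | h
    · rcases List.mem_append.mp h with h' | h' <;> (rw [List.mem_replicate] at h'; omega)
    · rw [List.mem_replicate] at h; omega

theorem pvSorted_filter (xs : List Int) :
    (PySem.List.sorted xs (fun x => x) false).filter pvRel = pvRep xs := by
  have hperm : (pvRep xs).Perm ((PySem.List.sorted xs (fun x => x) false).filter pvRel) :=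
    (pvRep_perm xs).trans (List.Perm.filter pvRel (PySem.List.sorted_perm xs (fun x => x) false)).symm
  have hsorted : ((PySem.List.sorted xs (fun x => x) false).filter pvRel).Pairwise (· ≤ ·) :=
    List.Pairwise.filter pvRel (PySem.List.sorted_pairwise xs (fun x => x))
  exact List.Perm.eq_of_pairwise' hsorted (pvRep_pairwise xs) hperm.symm

-- ===== VERDICT (by name: the statement is the Claim_ definition above) =====
theorem get_subject_files_for_semesters_spec : Claim_equal_get_subject_files_for_semesters := by
  intro xs _
  unfold Spec_get_subject_files_for_semesters get_subject_files_for_semesters get_subject_files_for_semesters_alt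
  rw [pvA_eq_flatMap, List.nil_append, pvFlatMap_filter, pvSorted_filter]
  unfold pvGroups pvRep
  simp [List.foldl_cons, List.flatMap_append, List.flatMap_replicate, pvChunk]
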